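-- pv_equiv track=rewrite | github.com/velezy/yamil-browser | chat-service/assemblyline-common/assemblyline_common/observability/prometheus_metrics.py | _detect_metric_categories
-- ===== SOURCE A (Python) =====
-- from typing import Any, Callable, Dict, List, Optional, TypeVar, Tuple
--
-- def _detect_metric_categories(
--
--     metric_names: List[str]
-- ) -> Dict[str, List[str]]:
--     """Categorize metrics by naming patterns."""
--     categories: Dict[str, List[str]] = {
--         "http": [],
--         "llm": [],
--         "rag": [],
--         "db": [],
--         "error": [],
--         "other": [],
--     }
--
--     for metric in metric_names:
--         metric_lower = metric.lower()
--         if "http" in metric_lower or "request" in metric_lower: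
--             categories["http"].append(metric)
--         elif "llm" in metric_lower or "model" in metric_lower or "token" in metric_lower:
--             categories["llm"].append(metric)
--         elif "rag" in metric_lower or "retriev" in metric_lower or "document" in metric_lower:
--             categories["rag"].append(metric)
--         elif "db" in metric_lower or "database" in metric_lower or "query" in metric_lower:
--             categories["db"].append(metric)
--         elif "error" in metric_lower or "fail" in metric_lower:
--             categories["error"].append(metric)
--         else:
--             categories["other"].append(metric)
--
--     return {k: v for k, v in categories.items() if v}
-- ===== SOURCE B (Python) =====
-- # Table-driven, category-major rewrite: label each metric once via an ordered
-- # (category, keywords) table, then collect each category's group in order.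
-- _TABLE = [
--     ("http", ["http", "request"]),
--     ("llm", ["llm", "model", "token"]),
--     ("rag", ["rag", "retriev", "document"]),
--     ("db", ["db", "database", "query"]),
--     ("error", ["error", "fail"]),
-- ]
--
--
-- def _label(metric):
--     ml = metric.lower()
--     for name, kws in _TABLE:
--         if any(kw in ml for kw in kws):
--             return name
--     return "other"
--
--
-- def _detect_metric_categories(metric_names):
--     labels = [_label(m) for m in metric_names]
--     order = [name for name, _ in _TABLE] + ["other"]
--     result = {}
--     for cat in order:
--         group = [m for m, l in zip(metric_names, labels) if l == cat]
--         if group: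
--             result[cat] = group
--     return result
-- ===== Notes on version B (the rewrite author's own statement) =====
-- stated objective: idiomatic
-- what changed: Replaces the six-way if/elif chain appending into a pre-built dict with a data-driven design: an ordered (category, keywords) table, a label function giving each metric its first matching category, and a category-major pass that collects each category's group in priority order, skipping empty groups.
import Mathlib
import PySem

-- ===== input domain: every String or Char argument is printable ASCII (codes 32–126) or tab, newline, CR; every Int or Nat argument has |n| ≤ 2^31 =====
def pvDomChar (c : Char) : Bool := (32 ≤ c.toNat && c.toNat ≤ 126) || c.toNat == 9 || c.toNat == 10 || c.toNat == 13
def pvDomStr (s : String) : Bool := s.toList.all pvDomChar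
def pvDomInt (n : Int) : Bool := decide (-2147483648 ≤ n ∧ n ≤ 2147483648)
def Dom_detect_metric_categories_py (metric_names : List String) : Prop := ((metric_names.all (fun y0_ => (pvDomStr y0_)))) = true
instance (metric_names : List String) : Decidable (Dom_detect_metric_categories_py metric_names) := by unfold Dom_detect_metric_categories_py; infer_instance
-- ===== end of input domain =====

-- B replaces A's six-way if/elif chain by an ordered (category, keywords) table with a label
-- function and a category-major collection pass (idiomatic rewrite; return value only).

-- ===== PORT A =====
-- A: dict of six empty buckets, if/elif chain appends each metric to one bucket, drop empty buckets.
-- (categories[k].append(metric) on an always-present key k = Dict.modify k [] (· ++ [metric]).)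
def detect_metric_categories_py (metric_names : List String) : List (String × List String) :=
  let categories : PySem.Dict String (List String) :=
    PySem.Dict.ofList [("http", []), ("llm", []), ("rag", []), ("db", []), ("error", []), ("other", [])]
  let d := metric_names.foldl (fun d metric =>
    let ml := PySem.Str.lower metric
    if PySem.Str.isIn "http" ml || PySem.Str.isIn "request" ml then
      d.modify "http" [] (· ++ [metric])
    else if PySem.Str.isIn "llm" ml || PySem.Str.isIn "model" ml || PySem.Str.isIn "token" ml then
      d.modify "llm" [] (· ++ [metric])
    else if PySem.Str.isIn "rag" ml || PySem.Str.isIn "retriev" ml || PySem.Str.isIn "document" ml then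
      d.modify "rag" [] (· ++ [metric])
    else if PySem.Str.isIn "db" ml || PySem.Str.isIn "database" ml || PySem.Str.isIn "query" ml then
      d.modify "db" [] (· ++ [metric])
    else if PySem.Str.isIn "error" ml || PySem.Str.isIn "fail" ml then
      d.modify "error" [] (· ++ [metric])
    else
      d.modify "other" [] (· ++ [metric])) categories
  d.items.filter (fun kv => !kv.2.isEmpty)

-- ===== PORT B =====
-- B's priority-ordered (category, keywords) table (_TABLE in Source B).
def pvTable : List (String × List String) :=
  [("http", ["http", "request"]),
   ("llm", ["llm", "model", "token"]),
   ("rag", ["rag", "retriev", "document"]),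
   ("db", ["db", "database", "query"]),
   ("error", ["error", "fail"])]

-- B's _label: first table row one of whose keywords occurs in metric.lower(), else "other".
def pvLabel (metric : String) : String :=
  let ml := PySem.Str.lower metric
  match pvTable.find? (fun row => row.2.any (fun kw => PySem.Str.isIn kw ml)) with
  | some row => row.1
  | none => "other"

-- Source B's result dict is built by inserting fresh distinct keys in order = association-list append.
def detect_metric_categories_py_alt (metric_names : List String) : List (String × List String) :=
  let labels := metric_names.map pvLabel
  let order := pvTable.map (·.1) ++ ["other"]
  order.foldl (fun res cat =>
    let group := ((metric_names.zip labels).filter (fun p => p.2 == cat)).map (·.1)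
    if group.isEmpty then res else res ++ [(cat, group)]) []

-- ===== PRECONDITION & SPEC =====
def Spec_detect_metric_categories_py (metric_names : List String) (out : List (String × List String)) : Prop := out = detect_metric_categories_py_alt metric_names
instance (metric_names : List String) (out : List (String × List String)) : Decidable (Spec_detect_metric_categories_py metric_names out) := by unfold Spec_detect_metric_categories_py; infer_instance

-- ===== CLAIM (what is proved, stated in full; the proofs are below) =====
def Claim_equal_detect_metric_categories_py : Prop := ∀ (metric_names : List String), Dom_detect_metric_categories_py metric_names → Spec_detect_metric_categories_py metric_names (detect_metric_categories_py metric_names)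

-- ===== LEMMAS AND PROOFS =====

-- A's loop body, named for the proofs (definitionally the lambda inside the port of A).
def pvStepA (d : PySem.Dict String (List String)) (metric : String) : PySem.Dict String (List String) :=
  let ml := PySem.Str.lower metric
  if PySem.Str.isIn "http" ml || PySem.Str.isIn "request" ml then
    d.modify "http" [] (· ++ [metric])
  else if PySem.Str.isIn "llm" ml || PySem.Str.isIn "model" ml || PySem.Str.isIn "token" ml then
    d.modify "llm" [] (· ++ [metric])
  else if PySem.Str.isIn "rag" ml || PySem.Str.isIn "retriev" ml || PySem.Str.isIn "document" ml then
    d.modify "rag" [] (· ++ [metric])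
  else if PySem.Str.isIn "db" ml || PySem.Str.isIn "database" ml || PySem.Str.isIn "query" ml then
    d.modify "db" [] (· ++ [metric])
  else if PySem.Str.isIn "error" ml || PySem.Str.isIn "fail" ml then
    d.modify "error" [] (· ++ [metric])
  else
    d.modify "other" [] (· ++ [metric])

-- the metrics B's label function assigns to category c, in input order
def pvGroup (c : String) (ms : List String) : List String :=
  ms.filter (fun m => pvLabel m == c)

-- B's table lookup computes exactly A's if/elif chain of categories.
lemma pvLabel_eq (m : String) : pvLabel m =
    (let ml := PySem.Str.lower m
     if PySem.Str.isIn "http" ml || PySem.Str.isIn "request" ml then "http"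
     else if PySem.Str.isIn "llm" ml || PySem.Str.isIn "model" ml || PySem.Str.isIn "token" ml then "llm"
     else if PySem.Str.isIn "rag" ml || PySem.Str.isIn "retriev" ml || PySem.Str.isIn "document" ml then "rag"
     else if PySem.Str.isIn "db" ml || PySem.Str.isIn "database" ml || PySem.Str.isIn "query" ml then "db"
     else if PySem.Str.isIn "error" ml || PySem.Str.isIn "fail" ml then "error"
     else "other") := by
  simp only [pvLabel, pvTable, List.find?]
  split <;> rename_i h <;> (repeat' split at h) <;> (try cases h) <;> simp_all <;> (intros; simp_all)

-- loop invariant: A's fold appends to each bucket exactly the metrics B labels with that category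
lemma pvLoop_items (ms : List String) :
    ∀ v0 v1 v2 v3 v4 v5 : List String,
    (ms.foldl pvStepA (PySem.Dict.mk
        [("http", v0), ("llm", v1), ("rag", v2), ("db", v3), ("error", v4), ("other", v5)])).items =
      [("http", v0 ++ pvGroup "http" ms), ("llm", v1 ++ pvGroup "llm" ms),
       ("rag", v2 ++ pvGroup "rag" ms), ("db", v3 ++ pvGroup "db" ms),
       ("error", v4 ++ pvGroup "error" ms), ("other", v5 ++ pvGroup "other" ms)] := by
  induction ms with
  | nil => intro v0 v1 v2 v3 v4 v5; simp [pvGroup]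
  | cons m ms ih =>
    intro v0 v1 v2 v3 v4 v5
    have hl := pvLabel_eq m
    simp only at hl
    simp only [List.foldl_cons, pvStepA]
    split_ifs with h1 h2 h3 h4 h5
    · have hm : pvLabel m = "http" := by rw [hl, if_pos h1]
      rw [show (PySem.Dict.mk [("http", v0), ("llm", v1), ("rag", v2), ("db", v3), ("error", v4), ("other", v5)]
            : PySem.Dict String (List String)).modify "http" [] (· ++ [m])
          = PySem.Dict.mk [("http", v0 ++ [m]), ("llm", v1), ("rag", v2), ("db", v3), ("error", v4), ("other", v5)] from rfl,
        ih]
      simp [pvGroup, hm]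
    · have hm : pvLabel m = "llm" := by rw [hl, if_neg h1, if_pos h2]
      rw [show (PySem.Dict.mk [("http", v0), ("llm", v1), ("rag", v2), ("db", v3), ("error", v4), ("other", v5)]
            : PySem.Dict String (List String)).modify "llm" [] (· ++ [m])
          = PySem.Dict.mk [("http", v0), ("llm", v1 ++ [m]), ("rag", v2), ("db", v3), ("error", v4), ("other", v5)] from rfl,
        ih]
      simp [pvGroup, hm]
    · have hm : pvLabel m = "rag" := by rw [hl, if_neg h1, if_neg h2, if_pos h3]
      rw [show (PySem.Dict.mk [("http", v0), ("llm", v1), ("rag", v2), ("db", v3), ("error", v4), ("other", v5)]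
            : PySem.Dict String (List String)).modify "rag" [] (· ++ [m])
          = PySem.Dict.mk [("http", v0), ("llm", v1), ("rag", v2 ++ [m]), ("db", v3), ("error", v4), ("other", v5)] from rfl,
        ih]
      simp [pvGroup, hm]
    · have hm : pvLabel m = "db" := by rw [hl, if_neg h1, if_neg h2, if_neg h3, if_pos h4]
      rw [show (PySem.Dict.mk [("http", v0), ("llm", v1), ("rag", v2), ("db", v3), ("error", v4), ("other", v5)]
            : PySem.Dict String (List String)).modify "db" [] (· ++ [m])
          = PySem.Dict.mk [("http", v0), ("llm", v1), ("rag", v2), ("db", v3 ++ [m]), ("error", v4), ("other", v5)] from rfl,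
        ih]
      simp [pvGroup, hm]
    · have hm : pvLabel m = "error" := by rw [hl, if_neg h1, if_neg h2, if_neg h3, if_neg h4, if_pos h5]
      rw [show (PySem.Dict.mk [("http", v0), ("llm", v1), ("rag", v2), ("db", v3), ("error", v4), ("other", v5)]
            : PySem.Dict String (List String)).modify "error" [] (· ++ [m])
          = PySem.Dict.mk [("http", v0), ("llm", v1), ("rag", v2), ("db", v3), ("error", v4 ++ [m]), ("other", v5)] from rfl,
        ih]
      simp [pvGroup, hm]
    · have hm : pvLabel m = "other" := by rw [hl, if_neg h1, if_neg h2, if_neg h3, if_neg h4, if_neg h5]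
      rw [show (PySem.Dict.mk [("http", v0), ("llm", v1), ("rag", v2), ("db", v3), ("error", v4), ("other", v5)]
            : PySem.Dict String (List String)).modify "other" [] (· ++ [m])
          = PySem.Dict.mk [("http", v0), ("llm", v1), ("rag", v2), ("db", v3), ("error", v4), ("other", v5 ++ [m])] from rfl,
        ih]
      simp [pvGroup, hm]

-- B's zip-with-labels comprehension for category c is the label filter pvGroup c.
lemma pvZipGroup (c : String) (ms : List String) :
    ((ms.zip (ms.map pvLabel)).filter (fun p => p.2 == c)).map (·.1) = pvGroup c ms := by
  induction ms with
  | nil => simp [pvGroup]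
  | cons m ms ih =>
    by_cases h : pvLabel m == c <;> simp [pvGroup, List.filter, h, ih] at *

theorem pv_final (ms : List String) : detect_metric_categories_py ms = detect_metric_categories_py_alt ms := by
  simp only [detect_metric_categories_py, detect_metric_categories_py_alt]
  rw [show (PySem.Dict.ofList [("http", ([] : List String)), ("llm", []), ("rag", []), ("db", []), ("error", []), ("other", [])])
      = PySem.Dict.mk [("http", []), ("llm", []), ("rag", []), ("db", []), ("error", []), ("other", [])] from rfl]
  rw [show (fun (d : PySem.Dict String (List String)) (metric : String) =>
    let ml := PySem.Str.lower metric
    if PySem.Str.isIn "http" ml || PySem.Str.isIn "request" ml then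
      d.modify "http" [] (· ++ [metric])
    else if PySem.Str.isIn "llm" ml || PySem.Str.isIn "model" ml || PySem.Str.isIn "token" ml then
      d.modify "llm" [] (· ++ [metric])
    else if PySem.Str.isIn "rag" ml || PySem.Str.isIn "retriev" ml || PySem.Str.isIn "document" ml then
      d.modify "rag" [] (· ++ [metric])
    else if PySem.Str.isIn "db" ml || PySem.Str.isIn "database" ml || PySem.Str.isIn "query" ml then
      d.modify "db" [] (· ++ [metric])
    else if PySem.Str.isIn "error" ml || PySem.Str.isIn "fail" ml then
      d.modify "error" [] (· ++ [metric])
    else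
      d.modify "other" [] (· ++ [metric])) = pvStepA from rfl]
  rw [pvLoop_items ms [] [] [] [] [] []]
  simp only [pvTable, List.map, List.cons_append, List.nil_append, List.foldl, pvZipGroup,
    List.filter, List.nil_append]
  cases e1 : (pvGroup "http" ms).isEmpty <;> cases e2 : (pvGroup "llm" ms).isEmpty <;>
    cases e3 : (pvGroup "rag" ms).isEmpty <;> cases e4 : (pvGroup "db" ms).isEmpty <;>
      cases e5 : (pvGroup "error" ms).isEmpty <;> cases e6 : (pvGroup "other" ms).isEmpty <;>
        simp [*]

-- ===== VERDICT (by name: the statement is the Claim_ definition above) =====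
theorem detect_metric_categories_py_spec : Claim_equal_detect_metric_categories_py := by
  intro ms _
  unfold Spec_detect_metric_categories_py
  exact pv_final ms
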